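-- pv_equiv track=rewrite | github.com/Andywei24/Algorithms | Uber1.py | solution
-- ===== SOURCE A (Python) =====
-- def solution(diffs):
--     sum = 1500
--     max_score = 1500
--     min_score = 1500
--     for i in range(len(diffs)):
--         sum += diffs[i]
--         max_score = max(sum, max_score)
--         min_score = min(sum, min_score)
--         i += 1
--     return [max_score, min_score]
-- ===== SOURCE B (Python) =====
-- def solution(diffs):
--     # Divide and conquer: seg(l) returns (total, max prefix sum, min prefix sum)
--     # over l, where prefixes include the empty prefix (sum 0). Segments combine:
--     # a prefix of l1+l2 is a prefix of l1, or all of l1 plus a prefix of l2.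
--     def seg(l):
--         if not l:
--             return (0, 0, 0)
--         if len(l) == 1:
--             d = l[0]
--             return (d, max(0, d), min(0, d))
--         mid = len(l) // 2
--         tL, mxL, mnL = seg(l[:mid])
--         tR, mxR, mnR = seg(l[mid:])
--         return (tL + tR, max(mxL, tL + mxR), min(mnL, tL + mnR))
--     _, mx, mn = seg(diffs)
--     return [1500 + mx, 1500 + mn]
-- ===== Notes on version B (the rewrite author's own statement) =====
-- stated objective: alternative
-- what changed: B computes (segment total, max prefix sum, min prefix sum) by divide-and-conquer on list halves with an associative combine rule, instead of A's single left-to-right index loop maintaining running sum/max/min.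
import Mathlib
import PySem

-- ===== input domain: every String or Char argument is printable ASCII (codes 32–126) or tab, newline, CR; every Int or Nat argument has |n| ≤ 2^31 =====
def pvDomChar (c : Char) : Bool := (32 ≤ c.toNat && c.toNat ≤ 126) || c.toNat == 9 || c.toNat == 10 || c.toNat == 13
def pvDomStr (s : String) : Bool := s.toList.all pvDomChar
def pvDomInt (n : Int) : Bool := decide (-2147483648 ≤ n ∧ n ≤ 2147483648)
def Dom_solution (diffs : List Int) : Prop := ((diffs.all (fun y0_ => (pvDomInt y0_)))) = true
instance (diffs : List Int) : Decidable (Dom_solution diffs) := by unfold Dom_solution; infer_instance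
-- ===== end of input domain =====

-- B replaces A's fused left-to-right running-sum loop by a divide-and-conquer over list halves
-- combining (total, max prefix sum, min prefix sum) of the two halves (alternative algorithm, not faster).

-- ===== PORT A =====
-- A's loop: sum/max_score/min_score updated in one pass over diffs (the dead 'i += 1' has no effect)
def solution (diffs : List Int) : List Int :=
  let st := diffs.foldl
    (fun (st : Int × Int × Int) d =>
      (st.1 + d, max (st.1 + d) st.2.1, min (st.1 + d) st.2.2))
    (1500, 1500, 1500)
  [st.2.1, st.2.2]

-- ===== PORT B =====
-- seg l = (total of l, max prefix sum of l, min prefix sum of l), prefixes including the empty one;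
-- recursion splits l at len(l)//2, exactly as Source B's seg does with slices.
def segB : List Int → Int × Int × Int
  | [] => (0, 0, 0)
  | [d] => (d, max 0 d, min 0 d)
  | a :: b :: t =>
      let L := segB (List.take ((a :: b :: t).length / 2) (a :: b :: t))
      let R := segB (List.drop ((a :: b :: t).length / 2) (a :: b :: t))
      (L.1 + R.1, max L.2.1 (L.1 + R.2.1), min L.2.2 (L.1 + R.2.2))
  termination_by l => l.length
  decreasing_by
  · simp [List.length_take]; omega
  · simp; omega

def solution_alt (diffs : List Int) : List Int :=
  let s := segB diffs
  [1500 + s.2.1, 1500 + s.2.2]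

-- ===== PRECONDITION & SPEC =====
def Spec_solution (diffs : List Int) (out : List Int) : Prop := out = solution_alt diffs
instance (diffs : List Int) (out : List Int) : Decidable (Spec_solution diffs out) := by unfold Spec_solution; infer_instance

-- ===== CLAIM (what is proved, stated in full; the proofs are below) =====
def Claim_equal_solution : Prop := ∀ (diffs : List Int), Dom_solution diffs → Spec_solution diffs (solution diffs)

-- ===== LEMMAS AND PROOFS =====

-- mathematical max/min prefix sums (including the empty prefix)
def mxP : List Int → Int
  | [] => 0
  | d :: t => max 0 (d + mxP t)

def mnP : List Int → Int
  | [] => 0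
  | d :: t => min 0 (d + mnP t)

theorem mxP_nonneg (l : List Int) : 0 ≤ mxP l := by
  cases l <;> simp [mxP]

theorem mnP_nonpos (l : List Int) : mnP l ≤ 0 := by
  cases l <;> simp [mnP]

theorem mxP_append (l1 l2 : List Int) :
    mxP (l1 ++ l2) = max (mxP l1) (l1.sum + mxP l2) := by
  induction l1 with
  | nil => have := mxP_nonneg l2; simp [mxP]; omega
  | cons d t ih => simp [mxP, ih]; omega

theorem mnP_append (l1 l2 : List Int) :
    mnP (l1 ++ l2) = min (mnP l1) (l1.sum + mnP l2) := by
  induction l1 with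
  | nil => have := mnP_nonpos l2; simp [mnP]; omega
  | cons d t ih => simp [mnP, ih]; omega

theorem segB_eq (l : List Int) : segB l = (l.sum, mxP l, mnP l) := by
  induction l using segB.induct with
  | case1 => simp [segB, mxP, mnP]
  | case2 d => simp [segB, mxP, mnP]
  | case3 a b t ih1 ih2 =>
      simp only [segB, List.length_cons]
      simp only [List.length_cons] at ih1 ih2
      rw [ih1, ih2]
      have h : (a :: b :: t).take ((a :: b :: t).length / 2)
          ++ (a :: b :: t).drop ((a :: b :: t).length / 2) = a :: b :: t :=
        List.take_append_drop _ _
      simp only [List.length_cons] at h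
      refine Prod.ext ?_ (Prod.ext ?_ ?_)
      · conv_rhs => rw [← h]
        simp
      · conv_rhs => rw [← h]
        rw [mxP_append]
      · conv_rhs => rw [← h]
        rw [mnP_append]

-- A's loop invariant (mx ≥ s and mn ≤ s hold throughout A's run)
theorem loop_invariant (l : List Int) (s mx mn : Int) (hmx : s ≤ mx) (hmn : mn ≤ s) :
    l.foldl
      (fun (st : Int × Int × Int) d =>
        (st.1 + d, max (st.1 + d) st.2.1, min (st.1 + d) st.2.2))
      (s, mx, mn)
    = (s + l.sum, max mx (s + mxP l), min mn (s + mnP l)) := by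
  induction l generalizing s mx mn with
  | nil => simp [mxP, mnP]; omega
  | cons d t ih =>
      rw [List.foldl_cons, ih (s + d) _ _ (le_max_left _ _) (min_le_left _ _)]
      have h1 := mxP_nonneg t
      have h2 := mnP_nonpos t
      simp [mxP, mnP]
      constructor <;> [skip; constructor] <;> omega

-- ===== VERDICT (by name: the statement is the Claim_ definition above) =====
theorem solution_spec : Claim_equal_solution := by
  intro diffs _
  unfold Spec_solution solution solution_alt
  rw [loop_invariant diffs 1500 1500 1500 le_rfl le_rfl, segB_eq]
  have h1 := mxP_nonneg diffs
  have h2 := mnP_nonpos diffs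
  simp
  omega
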